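-- pv_equiv track=rewrite | github.com/Aditi187/Air-Gapped-Codebase-Modernization-Engine | agents/function_modernizer.py | _resolve_fqn_order
-- ===== SOURCE A (Python) =====
-- from typing import Any
--
-- def _resolve_fqn_order(order: list[str], functions: dict[str, dict[str, Any]]) -> list[str]:
--     name_to_fqns: dict[str, list[str]] = {}
--     for fqn, meta in functions.items():
--         simple_name = str(meta.get("name") or "")
--         if simple_name:
--             name_to_fqns.setdefault(simple_name, []).append(fqn)
--
--     resolved: list[str] = []
--     for item in order:
--         if item in functions:
--             resolved.append(item)
--             continue
--         resolved.extend(sorted(name_to_fqns.get(item, [])))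
--
--     seen = set(resolved)
--     resolved.extend(fqn for fqn in sorted(functions.keys()) if fqn not in seen)
--     return resolved
-- ===== SOURCE B (Python) =====
-- def _resolve_fqn_order(order: list[str], functions: dict[str, dict]) -> list[str]:
--     def matches(item):
--         if item in functions:
--             return [item]
--         if not item:
--             return []
--         return sorted(f for f, m in functions.items()
--                       if (m.get("name") or "") == item)
--     resolved = [f for item in order for f in matches(item)]
--     return resolved + [f for f in sorted(functions) if f not in resolved]
-- ===== Notes on version B (the rewrite author's own statement) =====
-- stated objective: simpler
-- what changed: B drops A's precomputed name-to-fqns inverse index and its seen-set: a per-item helper scans functions.items() for matching simple names (sorting the matches), the resolved list is a flat comprehension over order, and the backfill tests membership directly against the resolved list.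
import Mathlib
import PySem

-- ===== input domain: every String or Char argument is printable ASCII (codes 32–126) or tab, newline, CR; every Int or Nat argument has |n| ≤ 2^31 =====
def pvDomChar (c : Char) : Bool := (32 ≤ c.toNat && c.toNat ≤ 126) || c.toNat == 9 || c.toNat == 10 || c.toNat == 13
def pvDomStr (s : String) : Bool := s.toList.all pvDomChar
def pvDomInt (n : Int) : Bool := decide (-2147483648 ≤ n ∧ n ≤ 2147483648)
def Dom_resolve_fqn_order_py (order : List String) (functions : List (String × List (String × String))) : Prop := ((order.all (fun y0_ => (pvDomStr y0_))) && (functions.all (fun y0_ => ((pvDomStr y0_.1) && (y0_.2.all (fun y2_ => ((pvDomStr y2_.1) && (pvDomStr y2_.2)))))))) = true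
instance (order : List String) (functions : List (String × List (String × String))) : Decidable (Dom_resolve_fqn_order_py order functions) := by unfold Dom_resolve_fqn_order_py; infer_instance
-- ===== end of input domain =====

-- B drops A's precomputed name→fqn index and seen-set: a per-item helper scans functions.items() for matches, resolved is a flat map over order, backfill tests the resolved list directly; objective: simpler (no speed claim).


-- ===== PORT A =====
-- str(meta.get("name") or "") for a meta dict of strings: lookup with default "" ("" is falsy, str is identity here)
def pvName (fm : List (String × String)) : String :=
  (PySem.Dict.ofList fm).getD "name" ""

def resolve_fqn_order_py (order : List String) (functions : List (String × List (String × String))) : List String :=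
  let d := PySem.Dict.ofList functions
  let name_to_fqns : PySem.Dict String (List String) :=
    d.items.foldl (fun m p =>
      if pvName p.2 ≠ "" then m.modify (pvName p.2) [] (· ++ [p.1]) else m) PySem.Dict.empty
  let resolved := order.foldl (fun acc item =>
      if d.contains item then acc ++ [item]
      else acc ++ PySem.List.sorted (name_to_fqns.getD item []) id false) []
  resolved ++ (PySem.List.sorted d.keys id false).filter (fun k => !((PySem.Set.ofList resolved).contains k))

-- ===== PORT B =====
-- the inner helper 'matches': resolve one order item to its fqn list
def pvMatches (d : PySem.Dict String (List (String × String))) (item : String) : List String :=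
  if d.contains item then [item]
  else if item = "" then []
  else PySem.List.sorted ((d.items.filter (fun p => pvName p.2 == item)).map (·.1)) id false

def resolve_fqn_order_py_alt (order : List String) (functions : List (String × List (String × String))) : List String :=
  let d := PySem.Dict.ofList functions
  let resolved := order.flatMap (pvMatches d)
  resolved ++ (PySem.List.sorted d.keys id false).filter (fun k => !(resolved.contains k))

-- ===== PRECONDITION & SPEC =====
def Spec_resolve_fqn_order_py (order : List String) (functions : List (String × List (String × String))) (out : List String) : Prop := out = resolve_fqn_order_py_alt order functions
instance (order : List String) (functions : List (String × List (String × String))) (out : List String) : Decidable (Spec_resolve_fqn_order_py order functions out) := by unfold Spec_resolve_fqn_order_py; infer_instance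

-- ===== CLAIM (what is proved, stated in full; the proofs are below) =====
def Claim_equal_resolve_fqn_order_py : Prop := ∀ (order : List String) (functions : List (String × List (String × String))), Dom_resolve_fqn_order_py order functions → Spec_resolve_fqn_order_py order functions (resolve_fqn_order_py order functions)

-- ===== LEMMAS AND PROOFS =====

-- A's name→fqns index, looked up at `item`, is exactly B's filter over the items (empty for item = "").
lemma getD_nameIndex (l : List (String × List (String × String)))
    (m : PySem.Dict String (List String)) (item : String) :
    (l.foldl (fun m p =>
        if pvName p.2 ≠ "" then m.modify (pvName p.2) [] (· ++ [p.1]) else m) m).getD item []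
    = m.getD item [] ++
        (if item = "" then []
         else (l.filter (fun p => pvName p.2 == item)).map (·.1)) := by
  induction l generalizing m with
  | nil => simp
  | cons p l ih =>
    simp only [List.foldl_cons, List.filter_cons]
    by_cases hp : pvName p.2 = ""
    · rw [if_neg (not_not_intro hp), ih m]
      by_cases hi : item = ""
      · simp [hi]
      · have hc : (pvName p.2 == item) = false := by
          rw [hp]; simpa using hi
        simp [hc, hi]
    · rw [if_pos hp, ih (m.modify (pvName p.2) [] (· ++ [p.1])), PySem.Dict.getD_modify]
      by_cases he : item = pvName p.2
      · simp [he, hp]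
      · have hc : (pvName p.2 == item) = false := by
          simpa using fun h => he h.symm
        simp [he, hc]

-- A's per-item extension equals B's helper pvMatches.
lemma step_eq_matches (functions : List (String × List (String × String))) (item : String) :
    (if (PySem.Dict.ofList functions).contains item then [item]
     else PySem.List.sorted
       (((PySem.Dict.ofList functions).items.foldl (fun m p =>
           if pvName p.2 ≠ "" then m.modify (pvName p.2) [] (· ++ [p.1]) else m)
         PySem.Dict.empty).getD item []) id false)
    = pvMatches (PySem.Dict.ofList functions) item := by
  unfold pvMatches
  by_cases hc : (PySem.Dict.ofList functions).contains item
  · simp [hc]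
  · rw [if_neg hc, if_neg hc, getD_nameIndex]
    by_cases hi : item = "" <;> simp [hi, PySem.List.sorted]

theorem resolve_fqn_order_py_spec_aux (order : List String)
    (functions : List (String × List (String × String))) :
    resolve_fqn_order_py order functions = resolve_fqn_order_py_alt order functions := by
  simp only [resolve_fqn_order_py, resolve_fqn_order_py_alt]
  have hres :
      order.foldl (fun acc item =>
        if (PySem.Dict.ofList functions).contains item then acc ++ [item]
        else acc ++ PySem.List.sorted
          (((PySem.Dict.ofList functions).items.foldl (fun m p =>
              if pvName p.2 ≠ "" then m.modify (pvName p.2) [] (· ++ [p.1]) else m)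
            PySem.Dict.empty).getD item []) id false) []
      = order.flatMap (pvMatches (PySem.Dict.ofList functions)) := by
    have h1 :
        order.foldl (fun acc item =>
          if (PySem.Dict.ofList functions).contains item then acc ++ [item]
          else acc ++ PySem.List.sorted
            (((PySem.Dict.ofList functions).items.foldl (fun m p =>
                if pvName p.2 ≠ "" then m.modify (pvName p.2) [] (· ++ [p.1]) else m)
              PySem.Dict.empty).getD item []) id false) []
        = order.foldl (fun acc item => acc ++ pvMatches (PySem.Dict.ofList functions) item) [] := by
      refine PySem.List.foldl_congr_mem order _ _ [] (fun acc item _ => ?_)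
      rw [← step_eq_matches functions item]
      by_cases hc : (PySem.Dict.ofList functions).contains item <;> simp [hc]
    rw [h1, PySem.List.foldl_append_eq_flatMap, List.nil_append]
  rw [hres]
  congr 1
  refine List.filter_congr (fun k _ => ?_)
  simp [PySem.Set.mem_ofList]

-- ===== VERDICT (by name: the statement is the Claim_ definition above) =====
theorem resolve_fqn_order_py_spec : Claim_equal_resolve_fqn_order_py := by
  intro order functions _
  exact resolve_fqn_order_py_spec_aux order functions
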